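-- pv_equiv track=rewrite | github.com/s21sharan/ADvisor | backend/scripts/process_reddit_data.py | extract_communities_from_posts
-- ===== SOURCE A (Python) =====
-- from typing import List, Dict, Set
--
-- def extract_communities_from_posts(posts: List[Dict]) -> Dict[str, List[str]]:
--     """
--     Extract unique communities and sample posts for each
--
--     Returns:
--         Dict mapping community_name -> list of post titles
--     """
--     community_posts = {}
--
--     for post in posts:
--         if "error" in post or "community_name" not in post:
--             continue
--
--         community = post.get("community_name", "")
--         if not community:
--             continue
--
--         # Normalize community name
--         if not community.startswith("r/"):
--             community = f"r/{community}"
--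
--         if community not in community_posts:
--             community_posts[community] = []
--
--         # Collect sample post titles
--         title = post.get("title", "")
--         if title and len(community_posts[community]) < 20:
--             community_posts[community].append(title)
--
--     return community_posts
-- ===== SOURCE B (Python) =====
-- def extract_communities_from_posts(posts):
--     """Two staged passes: first collect the distinct normalized community names
--     in first-appearance order, then for each community scan the posts again,
--     taking its first 20 non-empty titles."""
--     def community_of(post):
--         if "error" in post or "community_name" not in post:
--             return None
--         name = post.get("community_name", "")
--         if not name:
--             return None
--         return name if name.startswith("r/") else "r/" + name
--
--     keys = []
--     for post in posts:
--         c = community_of(post)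
--         if c is not None and c not in keys:
--             keys.append(c)
--
--     return {
--         c: [p.get("title", "") for p in posts
--             if community_of(p) == c and p.get("title", "")][:20]
--         for c in keys
--     }
-- ===== Notes on version B (the rewrite author's own statement) =====
-- stated objective: alternative
-- what changed: A builds the result in one pass with a dict it mutates (pre-creating buckets, appending under an inline 20-cap); B never accumulates a dict in the loop: it first collects the distinct normalized community names in order, then builds each value by an independent per-community scan of the posts (list comprehension) truncated to 20.
import Mathlib
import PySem

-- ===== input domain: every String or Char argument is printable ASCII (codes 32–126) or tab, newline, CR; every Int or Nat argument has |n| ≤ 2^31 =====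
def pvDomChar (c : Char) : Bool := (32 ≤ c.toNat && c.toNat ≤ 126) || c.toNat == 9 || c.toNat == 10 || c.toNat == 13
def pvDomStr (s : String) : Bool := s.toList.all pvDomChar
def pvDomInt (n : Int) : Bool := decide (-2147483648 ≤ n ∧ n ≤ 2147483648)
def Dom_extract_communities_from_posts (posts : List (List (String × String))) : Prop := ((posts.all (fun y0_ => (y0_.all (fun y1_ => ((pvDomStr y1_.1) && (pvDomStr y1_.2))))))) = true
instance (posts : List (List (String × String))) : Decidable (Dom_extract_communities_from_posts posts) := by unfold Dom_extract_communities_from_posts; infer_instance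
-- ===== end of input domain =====

-- B replaces A's single mutated-dict pass by two staged passes (distinct keys first,
-- then one independent per-community scan per key); same return value, no speed claim.

-- ===== PORT A =====
-- normalize a community name: prepend "r/" unless already present (both Pythons contain this logic)
def pvNorm (c : String) : String :=
  if PySem.Str.startswith c "r/" then c else "r/" ++ c

-- A's loop body after the skip/normalize lines: pre-create the bucket, append only under the cap
def pvStepA2 (d : PySem.Dict String (List String)) (c t : String) :
    PySem.Dict String (List String) :=
  let d1 := if d.contains c then d else d.insert c []
  if t ≠ "" ∧ (d1.getD c []).length < 20 then d1.insert c (d1.getD c [] ++ [t]) else d1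

def pvStepA (d : PySem.Dict String (List String)) (post : List (String × String)) :
    PySem.Dict String (List String) :=
  if (PySem.Dict.mk post).contains "error" || !((PySem.Dict.mk post).contains "community_name") then d
  else if (PySem.Dict.mk post).getD "community_name" "" = "" then d
  else pvStepA2 d (pvNorm ((PySem.Dict.mk post).getD "community_name" ""))
         ((PySem.Dict.mk post).getD "title" "")

def extract_communities_from_posts (posts : List (List (String × String))) :
    List (String × List String) :=
  (posts.foldl pvStepA PySem.Dict.empty).items

-- ===== PORT B =====
-- B's helper community_of: None for skipped posts, else the normalized name
def pvCommunityOf (post : List (String × String)) : Option String :=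
  if (PySem.Dict.mk post).contains "error" || !((PySem.Dict.mk post).contains "community_name") then none
  else if (PySem.Dict.mk post).getD "community_name" "" = "" then none
  else some (pvNorm ((PySem.Dict.mk post).getD "community_name" ""))

-- pass 1: the distinct community names in first-appearance order
def pvKeysB (posts : List (List (String × String))) : List String :=
  posts.foldl (fun ks post =>
    match pvCommunityOf post with
    | some c => if c ∈ ks then ks else ks ++ [c]
    | none => ks) []

-- the value comprehension for one community: titles of its posts, truncated with [:20]
def pvValB (posts : List (List (String × String))) (c : String) : List String :=
  PySem.List.slice
    ((posts.filter (fun p =>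
        (pvCommunityOf p == some c) && ((PySem.Dict.mk p).getD "title" "" != ""))).map
      (fun p => (PySem.Dict.mk p).getD "title" ""))
    none (some 20)

-- the dict comprehension: its keys are distinct, so it IS this assoc list in key order
def extract_communities_from_posts_alt (posts : List (List (String × String))) :
    List (String × List String) :=
  (pvKeysB posts).map (fun c => (c, pvValB posts c))

-- ===== PRECONDITION & SPEC =====
def Spec_extract_communities_from_posts (posts : List (List (String × String))) (out : List (String × List String)) : Prop := out = extract_communities_from_posts_alt posts
instance (posts : List (List (String × String))) (out : List (String × List String)) : Decidable (Spec_extract_communities_from_posts posts out) := by unfold Spec_extract_communities_from_posts; infer_instance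

-- ===== CLAIM (what is proved, stated in full; the proofs are below) =====
def Claim_equal_extract_communities_from_posts : Prop := ∀ (posts : List (List (String × String))), Dom_extract_communities_from_posts posts → Spec_extract_communities_from_posts posts (extract_communities_from_posts posts)

-- ===== LEMMAS AND PROOFS =====

-- the classified entries of a post list: (community, title) for every non-skipped post
def pvEntries (posts : List (List (String × String))) : List (String × String) :=
  posts.filterMap (fun p => (pvCommunityOf p).map
    (fun c => (c, (PySem.Dict.mk p).getD "title" "")))

def pvKeysOf (es : List (String × String)) : List String :=
  es.foldl (fun ks e => if e.1 ∈ ks then ks else ks ++ [e.1]) []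

def pvVals (c : String) (es : List (String × String)) : List String :=
  (es.filter (fun e => (e.1 == c) && (e.2 != ""))).map Prod.snd

def pvMkState (es : List (String × String)) : PySem.Dict String (List String) :=
  PySem.Dict.mk ((pvKeysOf es).map (fun c => (c, (pvVals c es).take 20)))

theorem pv_stepA_classify (d : PySem.Dict String (List String))
    (p : List (String × String)) :
    pvStepA d p = match pvCommunityOf p with
      | none => d
      | some c => pvStepA2 d c ((PySem.Dict.mk p).getD "title" "") := by
  unfold pvStepA pvCommunityOf
  split_ifs <;> rfl

theorem pv_foldA_entries (posts : List (List (String × String)))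
    (d : PySem.Dict String (List String)) :
    posts.foldl pvStepA d = (pvEntries posts).foldl (fun d e => pvStepA2 d e.1 e.2) d := by
  induction posts generalizing d with
  | nil => rfl
  | cons p ps ih =>
      simp only [List.foldl_cons, pvEntries, List.filterMap_cons, pv_stepA_classify]
      cases h : pvCommunityOf p <;> simp [ih, pvEntries]

theorem pv_keysB_go (posts : List (List (String × String))) (ks : List String) :
    posts.foldl (fun ks post =>
      match pvCommunityOf post with
      | some c => if c ∈ ks then ks else ks ++ [c]
      | none => ks) ks
    = (pvEntries posts).foldl (fun ks e => if e.1 ∈ ks then ks else ks ++ [e.1]) ks := by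
  induction posts generalizing ks with
  | nil => rfl
  | cons p ps ih =>
      simp only [List.foldl_cons, pvEntries, List.filterMap_cons]
      cases h : pvCommunityOf p <;> simp [ih, pvEntries]

theorem pv_keysB_entries (posts : List (List (String × String))) :
    pvKeysB posts = pvKeysOf (pvEntries posts) := pv_keysB_go posts []

theorem pv_valB_entries (posts : List (List (String × String))) (c : String) :
    pvValB posts c = (pvVals c (pvEntries posts)).take 20 := by
  have hsl : ∀ (xs : List String), PySem.List.slice xs none (some 20) = xs.take 20 := by
    intro xs; simp [pysem]
  unfold pvValB pvVals
  rw [hsl]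
  congr 1
  induction posts with
  | nil => rfl
  | cons p ps ih =>
      simp only [pvEntries, List.filterMap_cons, List.filter_cons]
      cases h : pvCommunityOf p with
      | none => simp [pvEntries] at ih ⊢; simpa using ih
      | some c' =>
          by_cases hc : c' = c <;>
            by_cases ht : (PySem.Dict.mk p).getD "title" "" = "" <;>
              simp [hc, ht, pvEntries] at ih ⊢ <;> simpa using ih

-- keysOf is set(map fst) in first-occurrence order
theorem pv_keysOf_eq_set (es : List (String × String)) :
    pvKeysOf es = PySem.Set.ofList (es.map Prod.fst) := by
  unfold pvKeysOf
  have h : (fun (ks : List String) (e : String × String) => if e.1 ∈ ks then ks else ks ++ [e.1])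
      = fun ks e => PySem.Set.add ks e.1 := by
    funext ks e; rw [PySem.Set.add_eq_ite]
  rw [h, ← PySem.Set.update_map_eq_foldl_add, PySem.Set.update_nil_left]

theorem pv_keysOf_nodup (es : List (String × String)) : (pvKeysOf es).Nodup := by
  rw [pv_keysOf_eq_set]; exact PySem.Set.nodup_ofList _

theorem pv_mem_keysOf (es : List (String × String)) (c : String) :
    c ∈ pvKeysOf es ↔ ∃ e ∈ es, e.1 = c := by
  rw [pv_keysOf_eq_set]
  simp [PySem.Set.mem_ofList, eq_comm]

theorem pv_vals_append (c' c t : String) (es : List (String × String)) :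
    pvVals c' (es ++ [(c, t)]) = pvVals c' es ++ (if c' = c ∧ t ≠ "" then [t] else []) := by
  by_cases h1 : c' = c
  · subst h1
    by_cases h2 : t = "" <;> simp [pvVals, List.filter_append, h2]
  · have h1' : ¬c = c' := fun h => h1 h.symm
    by_cases h2 : t = "" <;> simp [pvVals, List.filter_append, h1, h1', h2]

theorem pv_keysOf_append (es : List (String × String)) (c t : String) :
    pvKeysOf (es ++ [(c, t)]) = if c ∈ pvKeysOf es then pvKeysOf es else pvKeysOf es ++ [c] := by
  unfold pvKeysOf
  rw [List.foldl_append]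
  rfl

theorem pv_keys_mkState (es : List (String × String)) :
    (pvMkState es).keys = pvKeysOf es := by
  simp [pvMkState, PySem.Dict.keys, List.map_map, Function.comp_def]

theorem pv_contains_mkState (es : List (String × String)) (c : String) :
    (pvMkState es).contains c = true ↔ c ∈ pvKeysOf es := by
  rw [PySem.Dict.contains_iff_mem_keys, pv_keys_mkState]

theorem pv_getD_mkState (es : List (String × String)) (c : String) (hc : c ∈ pvKeysOf es) :
    (pvMkState es).getD c [] = (pvVals c es).take 20 := by
  apply PySem.Dict.getD_of_mem_items
  · show (c, (pvVals c es).take 20) ∈ (pvKeysOf es).map _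
    exact List.mem_map.2 ⟨c, hc, rfl⟩
  · rw [pv_keys_mkState]; exact pv_keysOf_nodup es

theorem pv_step (es : List (String × String)) (c t : String) :
    pvStepA2 (pvMkState es) c t = pvMkState (es ++ [(c, t)]) := by
  unfold pvStepA2
  by_cases hc : c ∈ pvKeysOf es
  · have hcont : (pvMkState es).contains c = true := (pv_contains_mkState es c).2 hc
    have hg : (pvMkState es).getD c [] = (pvVals c es).take 20 := pv_getD_mkState es c hc
    simp only [hcont, if_true, hg]
    by_cases ht : t = ""
    · subst ht
      rw [if_neg (by simp)]
      unfold pvMkState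
      rw [pv_keysOf_append, if_pos hc]
      refine congrArg PySem.Dict.mk (List.map_congr_left fun c' _ => ?_)
      rw [pv_vals_append]
      simp
    · by_cases hlen : ((pvVals c es).take 20).length < 20
      · have hcond : (¬t = "" ∧ ((pvVals c es).take 20).length < 20) := ⟨ht, hlen⟩
        rw [if_pos hcond]
        have hlt : (pvVals c es).length < 20 := by
          rw [List.length_take] at hlen; omega
        have h20 : (pvVals c es).take 20 = pvVals c es :=
          List.take_of_length_le (by omega)
        apply PySem.Dict.ext
        rw [PySem.Dict.items_insert]
        simp only [hcont, if_true]
        unfold pvMkState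
        show (List.map _ ((pvKeysOf es).map _)) = _
        rw [pv_keysOf_append, if_pos hc, List.map_map]
        refine List.map_congr_left fun c' _ => ?_
        rw [pv_vals_append]
        by_cases h' : c' = c
        · subst h'
          simp only [Function.comp, beq_self_eq_true, if_true, ne_eq, ht,
            not_false_iff, and_true]
          rw [h20, List.take_of_length_le (by simp; omega)]
        · simp [Function.comp, h']
      · rw [if_neg (by intro h; exact hlen h.2)]
        unfold pvMkState
        rw [pv_keysOf_append, if_pos hc]
        refine congrArg PySem.Dict.mk (List.map_congr_left fun c' _ => ?_)
        rw [pv_vals_append]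
        by_cases h' : c' = c
        · subst h'
          have hge : 20 ≤ (pvVals c' es).length := by
            rw [List.length_take] at hlen; omega
          simp only [ne_eq, ht, not_false_iff, and_true]
          rw [List.take_append_of_le_length hge]
        · simp [h']
  · have hcont : (pvMkState es).contains c = false := by
      rw [← Bool.not_eq_true, pv_contains_mkState]; exact hc
    have hvnil : pvVals c es = [] := by
      unfold pvVals
      rw [List.filter_eq_nil_iff.2, List.map_nil]
      intro e he
      have : e.1 ≠ c := fun h => hc ((pv_mem_keysOf es c).2 ⟨e, he, h⟩)
      simp [this]
    simp only [hcont, Bool.false_eq_true, if_false]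
    have hg0 : ((pvMkState es).insert c []).getD c [] = ([] : List String) :=
      PySem.Dict.getD_insert_self _ _ _ _
    simp only [hg0, List.length_nil, List.nil_append]
    have hitems : ∀ v : List String, ((pvMkState es).insert c v).items
        = (pvMkState es).items ++ [(c, v)] := by
      intro v
      rw [PySem.Dict.items_insert]
      simp only [hcont, Bool.false_eq_true, if_false]
    have hrhs : pvMkState (es ++ [(c, t)])
        = PySem.Dict.mk ((pvMkState es).items
            ++ [(c, (pvVals c es ++ (if t ≠ "" then [t] else [])).take 20)]) := by
      unfold pvMkState
      rw [pv_keysOf_append, if_neg hc, List.map_append]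
      refine congrArg PySem.Dict.mk ?_
      refine congrArg₂ _ (List.map_congr_left fun c' hc' => ?_) ?_
      · rw [pv_vals_append]
        have h' : c' ≠ c := fun h => hc (h ▸ hc')
        simp [h']
      · rw [List.map_singleton, pv_vals_append]
        simp
    by_cases ht : t = ""
    · subst ht
      rw [if_neg (by simp)]
      rw [hrhs]
      apply PySem.Dict.ext
      rw [hitems]
      simp [hvnil]
    · rw [if_pos ⟨ht, by norm_num⟩, PySem.Dict.insert_insert_self, hrhs]
      apply PySem.Dict.ext
      rw [hitems]
      simp [hvnil, ht]

theorem pv_main (es : List (String × String)) :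
    es.foldl (fun d e => pvStepA2 d e.1 e.2) PySem.Dict.empty = pvMkState es := by
  induction es using List.reverseRecOn with
  | nil => rfl
  | append_singleton es e ih =>
      rw [List.foldl_append, List.foldl_cons, List.foldl_nil, ih]
      exact pv_step es e.1 e.2

-- ===== VERDICT (by name: the statement is the Claim_ definition above) =====
theorem extract_communities_from_posts_spec : Claim_equal_extract_communities_from_posts := by
  intro posts _
  unfold Spec_extract_communities_from_posts extract_communities_from_posts
    extract_communities_from_posts_alt
  rw [pv_foldA_entries, pv_main, pv_keysB_entries]
  unfold pvMkState
  refine (List.map_congr_left (fun c _ => ?_)).symm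
  rw [pv_valB_entries]
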